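-- pv_equiv track=rewrite | github.com/elab-development/internet-tehnologije-2025-appzagradskiprevoz_2022_0066 | backend/core/views.py | states_to_station_path_and_segments
-- ===== SOURCE A (Python) =====
-- def states_to_station_path_and_segments(states, line_seq, pos_in_line):
--     """
--     Convert state path [(sid,lid),...] into:
--       - ordered station_id list without duplicates
--       - segments with proper line + from/to station_ids (in the correct direction)
--     """
--     if not states:
--         return [], []
--
--     # station path (keep consecutive duplicates out)
--     station_ids = []
--     for sid, lid in states:
--         if not station_ids or station_ids[-1] != sid:
--             station_ids.append(sid)
--
--     # segments: whenever line changes in states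
--     segments = []
--     cur_line = states[0][1]
--     seg_start_sid = states[0][0]
--
--     for i in range(1, len(states)):
--         sid, lid = states[i]
--         prev_sid, prev_lid = states[i-1]
--         if lid != cur_line:
--             # close segment on previous line at prev_sid
--             segments.append({
--                 "line_id": cur_line,
--                 "from_station_id": seg_start_sid,
--                 "to_station_id": prev_sid,
--             })
--             cur_line = lid
--             seg_start_sid = prev_sid
--
--     # close last segment
--     segments.append({
--         "line_id": cur_line,
--         "from_station_id": seg_start_sid,
--         "to_station_id": states[-1][0],
--     })
--
--     return station_ids, segments
-- ===== SOURCE B (Python) =====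
-- def states_to_station_path_and_segments(states, line_seq, pos_in_line):
--     """Staged, index-based rebuild: first compute the boundary indices where a
--     station or a line run begins, then materialise the path and the segments
--     by random access into states (no running accumulator state)."""
--     if not states:
--         return [], []
--
--     n = len(states)
--
--     # station path: the stations standing at the start of each station-run
--     station_ids = [states[i][0] for i in range(n)
--                    if i == 0 or states[i][0] != states[i - 1][0]]
--
--     # indices where a new line run begins
--     starts = [i for i in range(n) if i == 0 or states[i][1] != states[i - 1][1]]
--     # each run ends just before the next run starts; the last ends at n-1
--     ends = [s - 1 for s in starts[1:]] + [n - 1]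
--     # a segment departs from the previous run's last station (the first from
--     # the very first station)
--     froms = [states[0][0]] + [states[e][0] for e in ends[:-1]]
--
--     segments = [{
--         "line_id": states[s][1],
--         "from_station_id": f,
--         "to_station_id": states[e][0],
--     } for s, f, e in zip(starts, froms, ends)]
--
--     return station_ids, segments
-- ===== Notes on version B (the rewrite author's own statement) =====
-- stated objective: alternative
-- what changed: Replaces A's single left-to-right sweep with mutable cur_line/seg_start state by a staged, index-based construction: first compute the boundary-index lists (run starts, run ends, carried-over from-stations), then build station_ids and the segments by random access into states over a zip of those index lists.
import Mathlib
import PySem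

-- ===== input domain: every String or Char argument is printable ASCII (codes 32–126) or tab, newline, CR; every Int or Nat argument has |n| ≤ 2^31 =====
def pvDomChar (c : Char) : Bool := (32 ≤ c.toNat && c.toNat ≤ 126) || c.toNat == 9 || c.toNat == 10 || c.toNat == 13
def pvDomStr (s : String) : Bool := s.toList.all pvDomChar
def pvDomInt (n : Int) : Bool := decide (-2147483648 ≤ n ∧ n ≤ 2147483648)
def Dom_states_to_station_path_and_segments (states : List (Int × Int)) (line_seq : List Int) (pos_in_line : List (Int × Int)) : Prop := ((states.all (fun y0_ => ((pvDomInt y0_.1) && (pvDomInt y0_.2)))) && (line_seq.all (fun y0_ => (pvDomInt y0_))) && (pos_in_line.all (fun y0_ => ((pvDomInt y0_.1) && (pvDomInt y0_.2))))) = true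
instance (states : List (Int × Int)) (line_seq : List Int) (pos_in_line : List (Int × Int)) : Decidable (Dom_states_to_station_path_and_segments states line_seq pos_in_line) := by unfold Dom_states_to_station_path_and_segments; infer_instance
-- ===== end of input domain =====

-- B rebuilds path and segments by a staged, index-based construction (boundary-index
-- lists + random access) instead of A's one sweep with mutable state; objective:
-- alternative decomposition, same cost.

-- ===== PORT A =====

-- a segment dict {"line_id": l, "from_station_id": f, "to_station_id": t} as an assoc list
def pvMkSeg (l f t : Int) : List (String × Int) :=
  [("line_id", l), ("from_station_id", f), ("to_station_id", t)]

-- one step of A's station_ids loop: append sid unless it equals the last appended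
def pvAStation (acc : List Int) (p : Int × Int) : List Int :=
  if acc = [] ∨ acc.getLast? ≠ some p.1 then acc ++ [p.1] else acc

-- one step of A's segment loop over the pair (states[i-1], states[i]); state = (segments, cur_line, seg_start_sid)
def pvAStep (st : List (List (String × Int)) × Int × Int) (pr : (Int × Int) × (Int × Int)) :
    List (List (String × Int)) × Int × Int :=
  if pr.2.2 ≠ st.2.1 then (st.1 ++ [pvMkSeg st.2.1 st.2.2 pr.1.1], pr.2.2, pr.1.1)
  else st

def states_to_station_path_and_segments (states : List (Int × Int)) (line_seq : List Int) (pos_in_line : List (Int × Int)) : List Int × (List (List (String × Int))) :=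
  match states with
  | [] => ([], [])
  | (s0, l0) :: _ =>
    let station_ids := states.foldl pvAStation []
    -- loop "for i in range(1, len(states))" reads states[i] and states[i-1]:
    -- folded over the consecutive pairs states.zip states.tail
    let res := (states.zip states.tail).foldl pvAStep ([], l0, s0)
    -- states[-1][0]: states is nonempty here, so getLastD is exact
    (station_ids, res.1 ++ [pvMkSeg res.2.1 res.2.2 (states.getLastD (0, 0)).1])

-- ===== PORT B =====

-- states[i] for an in-range index i (Source B only indexes in range)
def pvBGet (states : List (Int × Int)) (i : Nat) : Int × Int := states.getD i (0, 0)

-- [states[i][0] for i in range(n) if i == 0 or states[i][0] != states[i-1][0]]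
def pvBStation (states : List (Int × Int)) : List Int :=
  ((List.range states.length).filter fun i =>
      i == 0 || (pvBGet states i).1 != (pvBGet states (i - 1)).1).map
    fun i => (pvBGet states i).1

-- starts = [i for i in range(n) if i == 0 or states[i][1] != states[i-1][1]]
def pvBStarts (states : List (Int × Int)) : List Nat :=
  (List.range states.length).filter fun i =>
    i == 0 || (pvBGet states i).2 != (pvBGet states (i - 1)).2

-- ends = [s - 1 for s in starts[1:]] + [n - 1]
def pvBEnds (states : List (Int × Int)) : List Nat :=
  ((pvBStarts states).drop 1).map (fun s => s - 1) ++ [states.length - 1]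

-- froms = [states[0][0]] + [states[e][0] for e in ends[:-1]]
def pvBFroms (states : List (Int × Int)) : List Int :=
  (pvBGet states 0).1 :: ((pvBEnds states).dropLast.map fun e => (pvBGet states e).1)

-- the segment built from one (s, f, e) triple of zip(starts, froms, ends)
def pvBSeg (states : List (Int × Int)) (sfe : Nat × Int × Nat) : List (String × Int) :=
  pvMkSeg (pvBGet states sfe.1).2 sfe.2.1 (pvBGet states sfe.2.2).1

def pvBSegments (states : List (Int × Int)) : List (List (String × Int)) :=
  ((pvBStarts states).zip ((pvBFroms states).zip (pvBEnds states))).map (pvBSeg states)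

def states_to_station_path_and_segments_alt (states : List (Int × Int)) (line_seq : List Int) (pos_in_line : List (Int × Int)) : List Int × (List (List (String × Int))) :=
  match states with
  | [] => ([], [])
  | _ :: _ => (pvBStation states, pvBSegments states)

-- ===== PRECONDITION & SPEC =====
def Spec_states_to_station_path_and_segments (states : List (Int × Int)) (line_seq : List Int) (pos_in_line : List (Int × Int)) (out : List Int × (List (List (String × Int)))) : Prop := out = states_to_station_path_and_segments_alt states line_seq pos_in_line
instance (states : List (Int × Int)) (line_seq : List Int) (pos_in_line : List (Int × Int)) (out : List Int × (List (List (String × Int)))) : Decidable (Spec_states_to_station_path_and_segments states line_seq pos_in_line out) := by unfold Spec_states_to_station_path_and_segments; infer_instance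

-- ===== CLAIM (what is proved, stated in full; the proofs are below) =====
def Claim_equal_states_to_station_path_and_segments : Prop := ∀ (states : List (Int × Int)) (line_seq : List Int) (pos_in_line : List (Int × Int)), Dom_states_to_station_path_and_segments states line_seq pos_in_line → Spec_states_to_station_path_and_segments states line_seq pos_in_line (states_to_station_path_and_segments states line_seq pos_in_line)

-- ===== LEMMAS AND PROOFS =====

-- A's segment fold over the consecutive pairs of l, started from l's head
def pvAFold (l : List (Int × Int)) : List (List (String × Int)) × Int × Int :=
  (l.zip l.tail).foldl pvAStep ([], (l.headD (0, 0)).2, (l.headD (0, 0)).1)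

theorem pvBGet_append_lt (l : List (Int × Int)) (q : Int × Int) (i : Nat) (h : i < l.length) :
    pvBGet (l ++ [q]) i = pvBGet l i := by
  simp [pvBGet, List.getD, List.getElem?_append_left h]

theorem pvBGet_append_len (l : List (Int × Int)) (q : Int × Int) :
    pvBGet (l ++ [q]) l.length = q := by
  simp [pvBGet, List.getD]

theorem pvBGet_last (l : List (Int × Int)) (h : l ≠ []) :
    pvBGet l (l.length - 1) = l.getLastD (0, 0) := by
  simp [pvBGet, List.getD, List.getLastD_eq_getLast?, List.getLast?_eq_getElem?]

theorem pvZipPairs_snoc (l : List (Int × Int)) (q : Int × Int) (h : l ≠ []) :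
    (l ++ [q]).zip ((l ++ [q]).tail) = l.zip l.tail ++ [(l.getLastD (0, 0), q)] := by
  match l, h with
  | p :: l, _ =>
    induction l generalizing p with
    | nil => rfl
    | cons r rs ih =>
      have := ih r (by simp)
      simpa using congrArg (List.cons (p, r)) this

-- the filtered index lists only extend at the end when one element is appended
theorem pvBStarts_snoc (l : List (Int × Int)) (q : Int × Int) (h : l ≠ []) :
    pvBStarts (l ++ [q]) =
      pvBStarts l ++ (if q.2 ≠ (l.getLastD (0, 0)).2 then [l.length] else []) := by
  have hn : 0 < l.length := List.length_pos_of_ne_nil h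
  unfold pvBStarts
  rw [show (l ++ [q]).length = l.length + 1 by simp, List.range_succ, List.filter_append]
  congr 1
  · apply List.filter_congr
    intro i hi
    have hi' : i < l.length := List.mem_range.mp hi
    rw [pvBGet_append_lt _ _ _ hi',
      pvBGet_append_lt _ _ _ (lt_of_le_of_lt (Nat.sub_le i 1) hi')]
  · rw [List.filter_singleton]
    have h1 : pvBGet (l ++ [q]) (l.length - 1) = l.getLastD (0, 0) := by
      rw [pvBGet_append_lt _ _ _ (Nat.sub_lt hn one_pos), pvBGet_last l h]
    rw [pvBGet_append_len, h1]
    have hne : (l.length == 0) = false := by simpa using Nat.pos_iff_ne_zero.mp hn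
    simp only [hne, Bool.false_or]
    by_cases hq : q.2 = (l.getLastD (0, 0)).2 <;> simp [hq]

theorem pvBStation_snoc (l : List (Int × Int)) (q : Int × Int) (h : l ≠ []) :
    pvBStation (l ++ [q]) =
      pvBStation l ++ (if q.1 ≠ (l.getLastD (0, 0)).1 then [q.1] else []) := by
  have hn : 0 < l.length := List.length_pos_of_ne_nil h
  unfold pvBStation
  rw [show (l ++ [q]).length = l.length + 1 by simp, List.range_succ, List.filter_append,
    List.map_append]
  congr 1
  · rw [List.filter_congr (fun i hi => by
      have hi' : i < l.length := List.mem_range.mp hi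
      rw [pvBGet_append_lt _ _ _ hi',
        pvBGet_append_lt _ _ _ (lt_of_le_of_lt (Nat.sub_le i 1) hi')])]
    apply List.map_congr_left
    intro i hi
    have hi' : i < l.length := List.mem_range.mp (List.mem_filter.mp hi).1
    rw [pvBGet_append_lt _ _ _ hi']
  · rw [List.filter_singleton]
    have h1 : pvBGet (l ++ [q]) (l.length - 1) = l.getLastD (0, 0) := by
      rw [pvBGet_append_lt _ _ _ (Nat.sub_lt hn one_pos), pvBGet_last l h]
    rw [pvBGet_append_len, h1]
    have hne : (l.length == 0) = false := by simpa using Nat.pos_iff_ne_zero.mp hn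
    simp only [hne, Bool.false_or]
    by_cases hq : q.1 = (l.getLastD (0, 0)).1
    · simp [hq]
    · have hb : (q.1 != (l.getLastD (0, 0)).1) = true := by simpa using hq
      rw [if_pos hq]
      simp only [hb, cond_true, List.map_cons, List.map_nil, pvBGet_append_len]

theorem pvZip3_map_concat {α β γ δ : Type} (f : α × β × γ → δ)
    (a : List α) (b : List β) (c : List γ) (x : α) (y : β) (z : γ)
    (hab : a.length = b.length) (hbc : b.length = c.length) :
    ((a ++ [x]).zip ((b ++ [y]).zip (c ++ [z]))).map f
      = (a.zip (b.zip c)).map f ++ [f (x, y, z)] := by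
  rw [List.zip_append hbc, List.zip_append (by simp [hab, hbc]), List.map_append]
  rfl


theorem pvBSeg_append (l : List (Int × Int)) (q : Int × Int) (sfe : Nat × Int × Nat)
    (hs : sfe.1 < l.length) (he : sfe.2.2 < l.length) :
    pvBSeg (l ++ [q]) sfe = pvBSeg l sfe := by
  unfold pvBSeg
  rw [pvBGet_append_lt _ _ _ hs, pvBGet_append_lt _ _ _ he]

theorem pvHeadD_append (l : List (Int × Int)) (q : Int × Int) (h : l ≠ []) :
    (l ++ [q]).headD (0, 0) = l.headD (0, 0) := by
  cases l with
  | nil => exact absurd rfl h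
  | cons p r => rfl

theorem pvAFold_snoc (l : List (Int × Int)) (q : Int × Int) (h : l ≠ []) :
    pvAFold (l ++ [q]) = pvAStep (pvAFold l) (l.getLastD (0, 0), q) := by
  unfold pvAFold
  rw [pvZipPairs_snoc l q h, List.foldl_append, pvHeadD_append l q h]
  rfl

theorem pvPrefix_lt (l : List (Int × Int)) (hlt : ∀ i ∈ pvBStarts l, i < l.length) :
    ∀ e ∈ ((pvBStarts l).drop 1).map (fun s => s - 1), e < l.length := by
  intro e he
  obtain ⟨s, hs, rfl⟩ := List.mem_map.mp he
  exact lt_of_le_of_lt (Nat.sub_le s 1) (hlt s (List.mem_of_mem_drop hs))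

-- the big invariant, by snoc induction over nonempty l
theorem pvInvariant (l : List (Int × Int)) (h : l ≠ []) :
    (l.foldl pvAStation [] = pvBStation l) ∧
    ((pvBStation l).getLast? = some ((l.getLastD (0, 0)).1)) ∧
    (∀ i ∈ pvBStarts l, i < l.length) ∧
    ∃ s₀ sl f₀,
      pvBStarts l = s₀ ++ [sl] ∧
      pvBFroms l = f₀ ++ [(pvAFold l).2.2] ∧
      s₀.length = f₀.length ∧
      (pvAFold l).2.1 = (pvBGet l sl).2 ∧
      (pvAFold l).2.1 = (l.getLastD (0, 0)).2 ∧
      (pvAFold l).1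
        = (s₀.zip (f₀.zip (((pvBStarts l).drop 1).map (fun s => s - 1)))).map (pvBSeg l) := by
  induction l using List.reverseRecOn with
  | nil => exact absurd rfl h
  | append_singleton l q ih =>
    rcases eq_or_ne l [] with hl | hl
    · subst hl
      refine ⟨rfl, rfl, ?_, [], 0, [], rfl, rfl, rfl, rfl, rfl, rfl⟩
      intro i hi
      have : i = 0 := by simpa [pvBStarts, pvBGet] using hi
      simp [this]
    · obtain ⟨hst, hstl, hlt, s₀, sl, f₀, hs, hf, hsf, he1, he2, hr⟩ := ih hl
      have hn : 0 < l.length := List.length_pos_of_ne_nil hl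
      have hlast : (l ++ [q]).getLastD (0, 0) = q := by simp
      have hfold := pvAFold_snoc l q hl
      have hsl_lt : sl < l.length := hlt sl (hs ▸ List.mem_append_right _ (List.mem_singleton_self _))
      -- station part
      have hbl_ne : pvBStation l ≠ [] := by
        intro he; rw [he] at hstl; simp at hstl
      have hstation : (l ++ [q]).foldl pvAStation []
          = pvBStation l ++ (if q.1 ≠ (l.getLastD (0, 0)).1 then [q.1] else []) := by
        rw [List.foldl_append, hst]
        simp only [List.foldl_cons, List.foldl_nil]
        unfold pvAStation
        by_cases hq : q.1 = (l.getLastD (0, 0)).1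
        · have hcond : ¬(pvBStation l = [] ∨ (pvBStation l).getLast? ≠ some q.1) := by
            rintro (hc | hc)
            · exact hbl_ne hc
            · exact hc (by rw [hstl, hq])
          rw [if_neg hcond, if_neg (by simp [hq])]
          simp
        · rw [if_pos (Or.inr (by
            rw [hstl]
            simp only [ne_eq, Option.some.injEq]
            exact fun hc => hq hc.symm)), if_pos hq]
      refine ⟨?_, ?_, ?_, ?_⟩
      · rw [hstation, pvBStation_snoc l q hl]
      · rw [pvBStation_snoc l q hl, hlast]
        by_cases hq : q.1 = (l.getLastD (0, 0)).1
        · rw [if_neg (not_not_intro hq), List.append_nil, hstl, hq]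
        · rw [if_pos hq, List.getLast?_concat]
      · intro i hi
        rw [pvBStarts_snoc l q hl] at hi
        rcases List.mem_append.mp hi with hi | hi
        · have := hlt i hi; simp; omega
        · by_cases hq : q.2 = (l.getLastD (0, 0)).2 <;> simp [hq] at hi <;> simp [hi]
      · -- segment part
        by_cases hq : q.2 = (l.getLastD (0, 0)).2
        · -- same line: everything unchanged except the final close
          have hstarts : pvBStarts (l ++ [q]) = pvBStarts l := by
            rw [pvBStarts_snoc l q hl, if_neg (not_not_intro hq), List.append_nil]
          have hfold' : pvAFold (l ++ [q]) = pvAFold l := by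
            rw [hfold]
            unfold pvAStep
            rw [if_neg (by dsimp only; rw [he2]; exact not_not_intro hq)]
          have hends : pvBEnds (l ++ [q])
              = ((pvBStarts l).drop 1).map (fun s => s - 1) ++ [l.length] := by
            unfold pvBEnds
            rw [hstarts]; simp
          have hfr : pvBFroms (l ++ [q]) = pvBFroms l := by
            unfold pvBFroms
            rw [hends, List.dropLast_concat, pvBGet_append_lt _ _ _ hn]
            unfold pvBEnds
            rw [List.dropLast_concat]
            congr 1
            apply List.map_congr_left
            intro e he
            rw [pvBGet_append_lt _ _ _ (pvPrefix_lt l hlt e he)]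
          refine ⟨s₀, sl, f₀, hstarts ▸ hs, by rw [hfr, hfold', hf], hsf, ?_, ?_, ?_⟩
          · rw [hfold', he1, pvBGet_append_lt _ _ _ hsl_lt]
          · rw [hfold', he2, hlast, hq]
          · rw [hfold', hr, hstarts]
            apply List.map_congr_left
            intro x hx
            have hx1 : x.1 ∈ s₀ := ((List.of_mem_zip hx).1)
            have hx2 : x.2.2 ∈ ((pvBStarts l).drop 1).map (fun s => s - 1) :=
              (List.of_mem_zip (List.of_mem_zip hx).2).2
            exact (pvBSeg_append l q x
              (hlt x.1 (hs ▸ List.mem_append_left _ hx1))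
              (pvPrefix_lt l hlt _ hx2)).symm
        · -- line change: one more run
          have hstarts : pvBStarts (l ++ [q]) = pvBStarts l ++ [l.length] := by
            rw [pvBStarts_snoc l q hl, if_pos hq]
          have hfold' : pvAFold (l ++ [q])
              = ((pvAFold l).1 ++ [pvMkSeg (pvAFold l).2.1 (pvAFold l).2.2 (l.getLastD (0, 0)).1],
                 q.2, (l.getLastD (0, 0)).1) := by
            rw [hfold]
            unfold pvAStep
            rw [if_pos (by dsimp only; rw [he2]; exact hq)]
          have hc1 : (pvAFold (l ++ [q])).1
              = (pvAFold l).1 ++ [pvMkSeg (pvAFold l).2.1 (pvAFold l).2.2 (l.getLastD (0, 0)).1] := by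
            rw [hfold']
          have hc2 : (pvAFold (l ++ [q])).2.1 = q.2 := by rw [hfold']
          have hc3 : (pvAFold (l ++ [q])).2.2 = (l.getLastD (0, 0)).1 := by rw [hfold']
          have hdrop : (pvBStarts (l ++ [q])).drop 1 = (pvBStarts l).drop 1 ++ [l.length] := by
            rw [hstarts, List.drop_append_of_le_length (by rw [hs]; simp)]
          have hends : pvBEnds (l ++ [q]) = pvBEnds l ++ [l.length] := by
            unfold pvBEnds
            rw [hdrop]; simp
          have hprefix_map : (((pvBStarts l).drop 1).map (fun s => s - 1)).map
              (fun e => (pvBGet (l ++ [q]) e).1)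
              = (((pvBStarts l).drop 1).map (fun s => s - 1)).map
              (fun e => (pvBGet l e).1) := by
            apply List.map_congr_left
            intro e he
            rw [pvBGet_append_lt _ _ _ (pvPrefix_lt l hlt e he)]
          have hfr : pvBFroms (l ++ [q]) = pvBFroms l ++ [(l.getLastD (0, 0)).1] := by
            unfold pvBFroms
            rw [hends, List.dropLast_concat]
            unfold pvBEnds
            rw [pvBGet_append_lt _ _ _ hn, List.map_append, hprefix_map, List.dropLast_concat]
            have hget : pvBGet (l ++ [q]) (l.length - 1) = l.getLastD (0, 0) := by
              rw [pvBGet_append_lt _ _ _ (Nat.sub_lt hn one_pos), pvBGet_last l hl]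
            simp [hget]
          refine ⟨s₀ ++ [sl], l.length, f₀ ++ [(pvAFold l).2.2], by rw [hstarts, hs], ?_, by
              simp [hsf], ?_, ?_, ?_⟩
          · rw [hfr, hf, hc3]
          · rw [hc2, pvBGet_append_len]
          · rw [hc2, hlast]
          · rw [hc1, hdrop, List.map_append]
            have hlen1 : (s₀ ++ [sl]).length = (f₀ ++ [(pvAFold l).2.2]).length := by
              simp [hsf]
            have hlen2 : f₀.length
                = (((pvBStarts l).drop 1).map (fun s => s - 1)).length := by
              simp [hs, ← hsf]
            rw [show (([l.length] : List Nat).map (fun s => s - 1)) = [l.length - 1] from rfl]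
            rw [pvZip3_map_concat (pvBSeg (l ++ [q])) s₀ f₀
              (((pvBStarts l).drop 1).map (fun s => s - 1)) sl (pvAFold l).2.2 (l.length - 1)
              hsf hlen2]
            congr 1
            · rw [hr]
              apply List.map_congr_left
              intro x hx
              have hx1 : x.1 ∈ s₀ := ((List.of_mem_zip hx).1)
              have hx2 : x.2.2 ∈ ((pvBStarts l).drop 1).map (fun s => s - 1) :=
                (List.of_mem_zip (List.of_mem_zip hx).2).2
              exact (pvBSeg_append l q x
                (hlt x.1 (hs ▸ List.mem_append_left _ hx1))
                (pvPrefix_lt l hlt _ hx2)).symm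
            · unfold pvBSeg
              have hget : pvBGet (l ++ [q]) (l.length - 1) = l.getLastD (0, 0) := by
                rw [pvBGet_append_lt _ _ _ (Nat.sub_lt hn one_pos), pvBGet_last l hl]
              simp [hget, pvBGet_append_lt _ _ _ hsl_lt, he1]

-- ===== VERDICT (by name: the statement is the Claim_ definition above) =====
theorem states_to_station_path_and_segments_spec : Claim_equal_states_to_station_path_and_segments := by
  intro states line_seq pos_in_line _
  unfold Spec_states_to_station_path_and_segments
  cases states with
  | nil => rfl
  | cons p rest =>
    obtain ⟨s0, l0⟩ := p
    have hne : ((s0, l0) :: rest) ≠ [] := by simp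
    obtain ⟨hst, hstl, hlt, s₀, sl, f₀, hs, hf, hsf, he1, he2, hr⟩ := pvInvariant _ hne
    have hn : 0 < ((s0, l0) :: rest).length := by simp
    simp only [states_to_station_path_and_segments, states_to_station_path_and_segments_alt]
    refine Prod.ext hst ?_
    have hres : (((s0, l0) :: rest).zip (((s0, l0) :: rest).tail)).foldl pvAStep ([], l0, s0)
        = pvAFold ((s0, l0) :: rest) := rfl
    dsimp only
    rw [hres]
    have hlen2 : f₀.length
        = (((pvBStarts ((s0, l0) :: rest)).drop 1).map (fun s => s - 1)).length := by
      simp [hs, ← hsf]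
    unfold pvBSegments
    rw [hs, hf]
    show _ = (((s₀ ++ [sl]).zip ((f₀ ++ [(pvAFold ((s0, l0) :: rest)).2.2]).zip
        (((pvBStarts ((s0, l0) :: rest)).drop 1).map (fun s => s - 1)
          ++ [((s0, l0) :: rest).length - 1]))).map (pvBSeg ((s0, l0) :: rest)))
    rw [pvZip3_map_concat (pvBSeg ((s0, l0) :: rest)) s₀ f₀ _ sl _ _ hsf hlen2, ← hr]
    congr 1
    unfold pvBSeg
    rw [pvBGet_last _ hne, ← he1]
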